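-- pv_equiv track=rewrite | github.com/pdurlej/fallow-py | src/pyfallow/summary.py | summary_from_issue_dicts
-- ===== SOURCE A (Python) =====
-- from typing import Any
--
-- def summary_from_issue_dicts(issues: list[dict[str, Any]], duplicate_groups: int) -> dict[str, int]:
--     counts = {
--         "total_issues": len(issues),
--         "errors": 0,
--         "warnings": 0,
--         "info": 0,
--         "parse_errors": 0,
--         "config_errors": 0,
--         "unused_modules": 0,
--         "unused_symbols": 0,
--         "missing_dependencies": 0,
--         "unused_dependencies": 0,
--         "circular_dependencies": 0,
--         "duplicate_groups": duplicate_groups,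
--         "complexity_hotspots": 0,
--         "boundary_violations": 0,
--         "stale_suppressions": 0,
--     }
--     for issue in issues:
--         _count_issue(counts, issue)
--     return counts
--
-- def _count_issue(counts: dict[str, int], issue: dict[str, Any]) -> None:
--     severity = issue["severity"]
--     counts["errors" if severity == "error" else "warnings" if severity == "warning" else "info"] += 1
--     rule = issue["rule"]
--     if rule == "parse-error":
--         counts["parse_errors"] += 1
--     elif rule == "config-error":
--         counts["config_errors"] += 1
--     elif rule == "unused-module":
--         counts["unused_modules"] += 1
--     elif rule == "unused-symbol":
--         counts["unused_symbols"] += 1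
--     elif rule in MISSING_DEPENDENCY_RULES:
--         counts["missing_dependencies"] += 1
--     elif rule in UNUSED_DEPENDENCY_RULES:
--         counts["unused_dependencies"] += 1
--     elif rule == "circular-dependency":
--         counts["circular_dependencies"] += 1
--     elif rule in COMPLEXITY_RULES:
--         counts["complexity_hotspots"] += 1
--     elif rule == "boundary-violation":
--         counts["boundary_violations"] += 1
--     elif rule == "stale-suppression":
--         counts["stale_suppressions"] += 1
--
-- MISSING_DEPENDENCY_RULES = {
--     "missing-runtime-dependency",
--     "missing-type-dependency",
--     "missing-test-dependency",
--     "dev-dependency-used-in-runtime",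
--     "optional-dependency-used-in-runtime",
-- }
--
-- UNUSED_DEPENDENCY_RULES = {
--     "runtime-dependency-used-only-in-tests",
--     "runtime-dependency-used-only-for-types",
--     "unused-runtime-dependency",
-- }
--
-- COMPLEXITY_RULES = {
--     "high-cyclomatic-complexity",
--     "high-cognitive-complexity",
--     "large-function",
--     "large-file",
--     "risky-hotspot",
-- }
-- ===== SOURCE B (Python) =====
-- MISSING_DEPENDENCY_RULES = (
--     "missing-runtime-dependency",
--     "missing-type-dependency",
--     "missing-test-dependency",
--     "dev-dependency-used-in-runtime",
--     "optional-dependency-used-in-runtime",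
-- )
--
-- UNUSED_DEPENDENCY_RULES = (
--     "runtime-dependency-used-only-in-tests",
--     "runtime-dependency-used-only-for-types",
--     "unused-runtime-dependency",
-- )
--
-- COMPLEXITY_RULES = (
--     "high-cyclomatic-complexity",
--     "high-cognitive-complexity",
--     "large-function",
--     "large-file",
--     "risky-hotspot",
-- )
--
-- def summary_from_issue_dicts(issues, duplicate_groups):
--     severities = [issue["severity"] for issue in issues]
--     rules = [issue["rule"] for issue in issues]
--     return {
--         "total_issues": len(issues),
--         "errors": severities.count("error"),
--         "warnings": severities.count("warning"),
--         "info": len(issues) - severities.count("error") - severities.count("warning"),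
--         "parse_errors": rules.count("parse-error"),
--         "config_errors": rules.count("config-error"),
--         "unused_modules": rules.count("unused-module"),
--         "unused_symbols": rules.count("unused-symbol"),
--         "missing_dependencies": sum(rules.count(r) for r in MISSING_DEPENDENCY_RULES),
--         "unused_dependencies": sum(rules.count(r) for r in UNUSED_DEPENDENCY_RULES),
--         "circular_dependencies": rules.count("circular-dependency"),
--         "duplicate_groups": duplicate_groups,
--         "complexity_hotspots": sum(rules.count(r) for r in COMPLEXITY_RULES),
--         "boundary_violations": rules.count("boundary-violation"),
--         "stale_suppressions": rules.count("stale-suppression"),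
--     }
-- ===== Notes on version B (the rewrite author's own statement) =====
-- stated objective: alternative
-- what changed: replaces A's single mutating pass (a counters dict incremented per issue through an if/elif dispatch) by staged counting: extract the severity and rule lists once, then build the result dict directly from independent list.count aggregations (info as total minus errors minus warnings, group counters as sums of counts over the rule group)
import Mathlib
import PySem

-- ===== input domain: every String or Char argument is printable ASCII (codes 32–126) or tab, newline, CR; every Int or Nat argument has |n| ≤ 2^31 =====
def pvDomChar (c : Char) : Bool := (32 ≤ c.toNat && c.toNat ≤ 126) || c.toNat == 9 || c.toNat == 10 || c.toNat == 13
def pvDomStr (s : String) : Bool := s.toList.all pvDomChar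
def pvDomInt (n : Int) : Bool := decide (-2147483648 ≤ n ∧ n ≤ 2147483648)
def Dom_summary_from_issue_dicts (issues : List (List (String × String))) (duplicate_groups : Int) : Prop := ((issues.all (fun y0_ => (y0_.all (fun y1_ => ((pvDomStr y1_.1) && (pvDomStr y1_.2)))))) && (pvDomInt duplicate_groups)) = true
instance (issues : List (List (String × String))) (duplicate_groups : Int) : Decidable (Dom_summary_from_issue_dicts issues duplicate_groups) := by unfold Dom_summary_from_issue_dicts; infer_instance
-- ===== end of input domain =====

-- B replaces A's single mutating pass (a counters dict updated per issue through an if/elif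
-- dispatch) by staged counting: it extracts the severity and rule lists once and builds the
-- result dict directly from independent .count aggregations (alternative decomposition;
-- return value only).

-- issue["k"] on an issue dict (assoc list, first match; none = KeyError)
def dget? (d : List (String × String)) (k : String) : Option String :=
  match d with
  | [] => none
  | (a, b) :: rest => if a == k then some b else dget? rest k

def pyMISSING_DEPENDENCY_RULES : List String :=
  ["missing-runtime-dependency", "missing-type-dependency", "missing-test-dependency",
   "dev-dependency-used-in-runtime", "optional-dependency-used-in-runtime"]

def pyUNUSED_DEPENDENCY_RULES : List String :=
  ["runtime-dependency-used-only-in-tests", "runtime-dependency-used-only-for-types",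
   "unused-runtime-dependency"]

def pyCOMPLEXITY_RULES : List String :=
  ["high-cyclomatic-complexity", "high-cognitive-complexity", "large-function",
   "large-file", "risky-hotspot"]

-- ===== PORT A =====
def initCounts (issues : List (List (String × String))) (duplicate_groups : Int) : PySem.Dict String Int :=
  PySem.Dict.mk
    [("total_issues", (issues.length : Int)), ("errors", 0), ("warnings", 0), ("info", 0),
     ("parse_errors", 0), ("config_errors", 0), ("unused_modules", 0), ("unused_symbols", 0),
     ("missing_dependencies", 0), ("unused_dependencies", 0), ("circular_dependencies", 0),
     ("duplicate_groups", duplicate_groups), ("complexity_hotspots", 0),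
     ("boundary_violations", 0), ("stale_suppressions", 0)]

-- _count_issue; a missing "severity"/"rule" key is a KeyError in Python (excluded by Pre_),
-- here the remaining updates are skipped
def countIssue (counts : PySem.Dict String Int) (issue : List (String × String)) : PySem.Dict String Int :=
  match dget? issue "severity" with
  | none => counts
  | some severity =>
    let counts := counts.modify (if severity == "error" then "errors" else if severity == "warning" then "warnings" else "info") 0 (· + 1)
    match dget? issue "rule" with
    | none => counts
    | some rule =>
      if rule == "parse-error" then counts.modify "parse_errors" 0 (· + 1)
      else if rule == "config-error" then counts.modify "config_errors" 0 (· + 1)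
      else if rule == "unused-module" then counts.modify "unused_modules" 0 (· + 1)
      else if rule == "unused-symbol" then counts.modify "unused_symbols" 0 (· + 1)
      else if rule ∈ pyMISSING_DEPENDENCY_RULES then counts.modify "missing_dependencies" 0 (· + 1)
      else if rule ∈ pyUNUSED_DEPENDENCY_RULES then counts.modify "unused_dependencies" 0 (· + 1)
      else if rule == "circular-dependency" then counts.modify "circular_dependencies" 0 (· + 1)
      else if rule ∈ pyCOMPLEXITY_RULES then counts.modify "complexity_hotspots" 0 (· + 1)
      else if rule == "boundary-violation" then counts.modify "boundary_violations" 0 (· + 1)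
      else if rule == "stale-suppression" then counts.modify "stale_suppressions" 0 (· + 1)
      else counts

def summary_from_issue_dicts (issues : List (List (String × String))) (duplicate_groups : Int) : List (String × Int) :=
  (issues.foldl countIssue (initCounts issues duplicate_groups)).items

-- ===== PORT B =====
-- the comprehensions [issue["severity"] for issue in issues] / [issue["rule"] for issue in issues];
-- a missing key is a KeyError in Python (excluded by Pre_), here "" stands in
def summary_from_issue_dicts_alt (issues : List (List (String × String))) (duplicate_groups : Int) : List (String × Int) :=
  let severities := issues.map (fun issue => (dget? issue "severity").getD "")
  let rules := issues.map (fun issue => (dget? issue "rule").getD "")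
  [("total_issues", (issues.length : Int)),
   ("errors", (severities.count "error" : Int)),
   ("warnings", (severities.count "warning" : Int)),
   ("info", (issues.length : Int) - (severities.count "error" : Int) - (severities.count "warning" : Int)),
   ("parse_errors", (rules.count "parse-error" : Int)),
   ("config_errors", (rules.count "config-error" : Int)),
   ("unused_modules", (rules.count "unused-module" : Int)),
   ("unused_symbols", (rules.count "unused-symbol" : Int)),
   ("missing_dependencies", (pyMISSING_DEPENDENCY_RULES.map (fun r => (rules.count r : Int))).sum),
   ("unused_dependencies", (pyUNUSED_DEPENDENCY_RULES.map (fun r => (rules.count r : Int))).sum),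
   ("circular_dependencies", (rules.count "circular-dependency" : Int)),
   ("duplicate_groups", duplicate_groups),
   ("complexity_hotspots", (pyCOMPLEXITY_RULES.map (fun r => (rules.count r : Int))).sum),
   ("boundary_violations", (rules.count "boundary-violation" : Int)),
   ("stale_suppressions", (rules.count "stale-suppression" : Int))]

-- ===== PRECONDITION & SPEC =====
-- Pre_ excludes exactly the issues missing a "severity" or "rule" key, on which both Pythons raise KeyError.
def Pre_summary_from_issue_dicts (issues : List (List (String × String))) (duplicate_groups : Int) : Prop :=
  ∀ issue ∈ issues, "severity" ∈ issue.map (·.1) ∧ "rule" ∈ issue.map (·.1)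
instance (issues : List (List (String × String))) (duplicate_groups : Int) : Decidable (Pre_summary_from_issue_dicts issues duplicate_groups) := by unfold Pre_summary_from_issue_dicts; infer_instance

def pvWitness_summary_from_issue_dicts : (List (List (String × String))) × Int :=
  ([[("severity", "error"), ("rule", "parse-error")], [("severity", "note"), ("rule", "large-file")]], 2)

def Spec_summary_from_issue_dicts (issues : List (List (String × String))) (duplicate_groups : Int) (out : List (String × Int)) : Prop := out = summary_from_issue_dicts_alt issues duplicate_groups
instance (issues : List (List (String × String))) (duplicate_groups : Int) (out : List (String × Int)) : Decidable (Spec_summary_from_issue_dicts issues duplicate_groups out) := by unfold Spec_summary_from_issue_dicts; infer_instance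

-- ===== CLAIM (what is proved, stated in full; the proofs are below) =====
def Claim_equal_summary_from_issue_dicts : Prop := ∀ (issues : List (List (String × String))) (duplicate_groups : Int), Dom_summary_from_issue_dicts issues duplicate_groups → Pre_summary_from_issue_dicts issues duplicate_groups → Spec_summary_from_issue_dicts issues duplicate_groups (summary_from_issue_dicts issues duplicate_groups)

-- ===== LEMMAS AND PROOFS =====

def sevOf (issue : List (String × String)) : String := (dget? issue "severity").getD ""
def ruleOf (issue : List (String × String)) : String := (dget? issue "rule").getD ""

def mkD (t e w i p cf um us md ud cd dg ch bv ss : Int) : PySem.Dict String Int :=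
  PySem.Dict.mk
    [("total_issues", t), ("errors", e), ("warnings", w), ("info", i),
     ("parse_errors", p), ("config_errors", cf), ("unused_modules", um), ("unused_symbols", us),
     ("missing_dependencies", md), ("unused_dependencies", ud), ("circular_dependencies", cd),
     ("duplicate_groups", dg), ("complexity_hotspots", ch),
     ("boundary_violations", bv), ("stale_suppressions", ss)]

def cntSev (issues : List (List (String × String))) (s : String) : Int :=
  ((issues.map sevOf).count s : Int)

def cntRule (issues : List (List (String × String))) (r : String) : Int :=
  ((issues.map ruleOf).count r : Int)

def cntGroup (issues : List (List (String × String))) (g : List String) : Int :=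
  (g.map (fun r => cntRule issues r)).sum

lemma dget?_isSome_of_mem (d : List (String × String)) (k : String) (h : k ∈ d.map (·.1)) :
    (dget? d k).isSome := by
  induction d with
  | nil => simp at h
  | cons p rest ih =>
    simp only [dget?]
    by_cases hk : p.1 = k
    · simp [hk]
    · simp only [List.map_cons, List.mem_cons] at h
      rcases h with h | h
      · exact absurd h.symm hk
      · simpa [hk] using ih h

lemma sevModify_eval (s : String) (t e w i p cf um us md ud cd dg ch bv ss : Int) :
    (mkD t e w i p cf um us md ud cd dg ch bv ss).modify
        (if s == "error" then "errors" else if s == "warning" then "warnings" else "info") 0 (· + 1)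
      = mkD t (e + (if s = "error" then 1 else 0)) (w + (if s = "warning" then 1 else 0))
          (i + (if s = "error" ∨ s = "warning" then 0 else 1)) p cf um us md ud cd dg ch bv ss := by
  by_cases h1 : s = "error"
  · subst h1; simp; rfl
  · by_cases h2 : s = "warning"
    · subst h2; simp [h1]; rfl
    · simp [h1, h2]; rfl

lemma ruleChain_eval (r : String) (t e w i p cf um us md ud cd dg ch bv ss : Int) :
    (let counts := mkD t e w i p cf um us md ud cd dg ch bv ss
     if r == "parse-error" then counts.modify "parse_errors" 0 (· + 1)
     else if r == "config-error" then counts.modify "config_errors" 0 (· + 1)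
     else if r == "unused-module" then counts.modify "unused_modules" 0 (· + 1)
     else if r == "unused-symbol" then counts.modify "unused_symbols" 0 (· + 1)
     else if r ∈ pyMISSING_DEPENDENCY_RULES then counts.modify "missing_dependencies" 0 (· + 1)
     else if r ∈ pyUNUSED_DEPENDENCY_RULES then counts.modify "unused_dependencies" 0 (· + 1)
     else if r == "circular-dependency" then counts.modify "circular_dependencies" 0 (· + 1)
     else if r ∈ pyCOMPLEXITY_RULES then counts.modify "complexity_hotspots" 0 (· + 1)
     else if r == "boundary-violation" then counts.modify "boundary_violations" 0 (· + 1)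
     else if r == "stale-suppression" then counts.modify "stale_suppressions" 0 (· + 1)
     else counts)
      = mkD t e w i
          (p + (if r = "parse-error" then 1 else 0))
          (cf + (if r = "config-error" then 1 else 0))
          (um + (if r = "unused-module" then 1 else 0))
          (us + (if r = "unused-symbol" then 1 else 0))
          (md + (if r ∈ pyMISSING_DEPENDENCY_RULES then 1 else 0))
          (ud + (if r ∈ pyUNUSED_DEPENDENCY_RULES then 1 else 0))
          (cd + (if r = "circular-dependency" then 1 else 0))
          dg
          (ch + (if r ∈ pyCOMPLEXITY_RULES then 1 else 0))
          (bv + (if r = "boundary-violation" then 1 else 0))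
          (ss + (if r = "stale-suppression" then 1 else 0)) := by
  by_cases h : r ∈ ["parse-error", "config-error", "unused-module", "unused-symbol",
      "circular-dependency", "boundary-violation", "stale-suppression"]
      ∨ r ∈ pyMISSING_DEPENDENCY_RULES ∨ r ∈ pyUNUSED_DEPENDENCY_RULES
      ∨ r ∈ pyCOMPLEXITY_RULES
  · simp only [pyMISSING_DEPENDENCY_RULES, pyUNUSED_DEPENDENCY_RULES, pyCOMPLEXITY_RULES,
      List.mem_cons, List.not_mem_nil, or_false] at h
    rcases h with ((h|h|h|h|h|h|h)|(h|h|h|h|h)|(h|h|h)|(h|h|h|h|h)) <;> subst h <;>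
      simp [pyMISSING_DEPENDENCY_RULES, pyUNUSED_DEPENDENCY_RULES, pyCOMPLEXITY_RULES] <;> rfl
  · push Not at h
    obtain ⟨h0, hm, hu, hc⟩ := h
    simp only [pyMISSING_DEPENDENCY_RULES, pyUNUSED_DEPENDENCY_RULES, pyCOMPLEXITY_RULES,
      List.mem_cons, List.not_mem_nil, or_false, not_or] at h0 hm hu hc
    obtain ⟨n1, n2, n3, n4, n5, n6, n7⟩ := h0
    simp [pyMISSING_DEPENDENCY_RULES, pyUNUSED_DEPENDENCY_RULES, pyCOMPLEXITY_RULES,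
      n1, n2, n3, n4, n5, n6, n7, hm, hu, hc]

lemma countIssue_eval (issue : List (String × String)) (s r : String)
    (hs : dget? issue "severity" = some s) (hr : dget? issue "rule" = some r)
    (t e w i p cf um us md ud cd dg ch bv ss : Int) :
    countIssue (mkD t e w i p cf um us md ud cd dg ch bv ss) issue =
      mkD t
        (e + (if s = "error" then 1 else 0))
        (w + (if s = "warning" then 1 else 0))
        (i + (if s = "error" ∨ s = "warning" then 0 else 1))
        (p + (if r = "parse-error" then 1 else 0))
        (cf + (if r = "config-error" then 1 else 0))
        (um + (if r = "unused-module" then 1 else 0))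
        (us + (if r = "unused-symbol" then 1 else 0))
        (md + (if r ∈ pyMISSING_DEPENDENCY_RULES then 1 else 0))
        (ud + (if r ∈ pyUNUSED_DEPENDENCY_RULES then 1 else 0))
        (cd + (if r = "circular-dependency" then 1 else 0))
        dg
        (ch + (if r ∈ pyCOMPLEXITY_RULES then 1 else 0))
        (bv + (if r = "boundary-violation" then 1 else 0))
        (ss + (if r = "stale-suppression" then 1 else 0)) := by
  simp only [countIssue, hs, hr]
  rw [sevModify_eval]
  exact ruleChain_eval r _ _ _ _ _ _ _ _ _ _ _ _ _ _ _

lemma cntSev_cons (x : List (String × String)) (xs : List (List (String × String))) (s : String) :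
    cntSev (x :: xs) s = cntSev xs s + (if sevOf x = s then 1 else 0) := by
  simp [cntSev, List.count_cons]

lemma cntRule_cons (x : List (String × String)) (xs : List (List (String × String))) (r : String) :
    cntRule (x :: xs) r = cntRule xs r + (if ruleOf x = r then 1 else 0) := by
  simp [cntRule, List.count_cons]

lemma cntGroup_cons (g : List String) (hnd : g.Nodup)
    (x : List (String × String)) (xs : List (List (String × String))) :
    cntGroup (x :: xs) g = cntGroup xs g + (if ruleOf x ∈ g then 1 else 0) := by
  induction g with
  | nil => simp [cntGroup]
  | cons a g ih =>
    rcases List.nodup_cons.mp hnd with ⟨ha, hg⟩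
    simp only [cntGroup, List.map_cons, List.sum_cons] at *
    rw [cntRule_cons, ih hg]
    by_cases h : ruleOf x = a
    · subst h
      simp [ha]; ring
    · simp [h]
      by_cases h2 : ruleOf x ∈ g <;> simp [h2] <;> ring

lemma fold_eval (issues : List (List (String × String)))
    (hpre : ∀ issue ∈ issues, "severity" ∈ issue.map (·.1) ∧ "rule" ∈ issue.map (·.1))
    (t e w i p cf um us md ud cd dg ch bv ss : Int) :
    issues.foldl countIssue (mkD t e w i p cf um us md ud cd dg ch bv ss) =
      mkD t
        (e + cntSev issues "error")
        (w + cntSev issues "warning")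
        (i + ((issues.length : Int) - cntSev issues "error" - cntSev issues "warning"))
        (p + cntRule issues "parse-error")
        (cf + cntRule issues "config-error")
        (um + cntRule issues "unused-module")
        (us + cntRule issues "unused-symbol")
        (md + cntGroup issues pyMISSING_DEPENDENCY_RULES)
        (ud + cntGroup issues pyUNUSED_DEPENDENCY_RULES)
        (cd + cntRule issues "circular-dependency")
        dg
        (ch + cntGroup issues pyCOMPLEXITY_RULES)
        (bv + cntRule issues "boundary-violation")
        (ss + cntRule issues "stale-suppression") := by
  induction issues generalizing t e w i p cf um us md ud cd dg ch bv ss with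
  | nil => simp [cntSev, cntRule, cntGroup]
  | cons x xs ih =>
    obtain ⟨hsv, hrl⟩ := hpre x (List.mem_cons_self ..)
    obtain ⟨s, hs⟩ := Option.isSome_iff_exists.mp (dget?_isSome_of_mem x "severity" hsv)
    obtain ⟨r, hr⟩ := Option.isSome_iff_exists.mp (dget?_isSome_of_mem x "rule" hrl)
    have hsx : sevOf x = s := by simp [sevOf, hs]
    have hrx : ruleOf x = r := by simp [ruleOf, hr]
    rw [List.foldl_cons, countIssue_eval x s r hs hr,
        ih (fun y hy => hpre y (List.mem_cons_of_mem x hy))]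
    simp only [cntSev_cons, cntRule_cons,
        cntGroup_cons pyMISSING_DEPENDENCY_RULES (by decide),
        cntGroup_cons pyUNUSED_DEPENDENCY_RULES (by decide),
        cntGroup_cons pyCOMPLEXITY_RULES (by decide), hsx, hrx, List.length_cons]
    by_cases h1 : s = "error"
    · subst h1; simp [mkD]; omega
    · by_cases h2 : s = "warning"
      · subst h2; simp [mkD, h1]; omega
      · simp [mkD, h1, h2]; omega

-- ===== VERDICT (by name: the statement is the Claim_ definition above) =====
theorem summary_from_issue_dicts_spec : Claim_equal_summary_from_issue_dicts := by
  intro issues duplicate_groups _ hpre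
  unfold Spec_summary_from_issue_dicts summary_from_issue_dicts summary_from_issue_dicts_alt
  have hinit : initCounts issues duplicate_groups
      = mkD (issues.length : Int) 0 0 0 0 0 0 0 0 0 0 duplicate_groups 0 0 0 := rfl
  rw [hinit, fold_eval issues hpre]
  simp [mkD, cntSev, cntRule, cntGroup,
        show sevOf = fun issue => (dget? issue "severity").getD "" from rfl,
        show ruleOf = fun issue => (dget? issue "rule").getD "" from rfl]
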